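-- pv_equiv track=rewrite | github.com/KelseyKwon/backjoon-programmers | 프로그래머스/2/389480. 완전범죄/완전범죄.py | solution
-- ===== SOURCE A (Python) =====
-- def solution(info, n, m):
--     # prev_state[A] = B
--     prev_state = {0: 0}
--
--     # 각 물건에 대해 DP 갱신
--     for x, y in info:
--         next_state = {}
--
--         for A, B in prev_state.items():
--             # A가 훔치는 경우
--             if A + x < n:
--                 if (A + x) not in next_state or next_state[A + x] > B:
--                     next_state[A + x] = B
--
--             # B가 훔치는 경우
--             if B + y < m:
--                 if A not in next_state or next_state[A] > B + y:
--                     next_state[A] = B + y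
--
--         # 이번 물건 처리 후 가능한 상태가 없다면 실패
--         if not next_state:
--             return -1
--
--         # 다음 단계로 상태 갱신
--         prev_state = next_state
--
--     # 모든 물건을 처리한 후, A 흔적의 최소값 반환
--     return min(prev_state.keys())
-- ===== SOURCE B (Python) =====
-- def solution(info, n, m):
--     # Exhaustive search: try every way to assign each item to thief A (bit 0) or thief B (bit 1).
--     best = None
--     for mask in range(2 ** len(info)):
--         bits = mask
--         a = 0
--         b = 0
--         ok = True
--         for x, y in info:
--             if bits % 2 == 1:
--                 b += y
--                 if b >= m:
--                     ok = False
--                     break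
--             else:
--                 a += x
--                 if a >= n:
--                     ok = False
--                     break
--             bits //= 2
--         if ok and (best is None or a < best):
--             best = a
--     return -1 if best is None else best
-- ===== Notes on version B (the rewrite author's own statement) =====
-- stated objective: alternative
-- what changed: Replaced the dict-based DP (A-trace -> minimal B-trace per item round) by a direct exhaustive enumeration of all 2^len(info) assignments of items to the two thieves, simulating each assignment's per-item constraints and taking the minimal A-trace.
import Mathlib
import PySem

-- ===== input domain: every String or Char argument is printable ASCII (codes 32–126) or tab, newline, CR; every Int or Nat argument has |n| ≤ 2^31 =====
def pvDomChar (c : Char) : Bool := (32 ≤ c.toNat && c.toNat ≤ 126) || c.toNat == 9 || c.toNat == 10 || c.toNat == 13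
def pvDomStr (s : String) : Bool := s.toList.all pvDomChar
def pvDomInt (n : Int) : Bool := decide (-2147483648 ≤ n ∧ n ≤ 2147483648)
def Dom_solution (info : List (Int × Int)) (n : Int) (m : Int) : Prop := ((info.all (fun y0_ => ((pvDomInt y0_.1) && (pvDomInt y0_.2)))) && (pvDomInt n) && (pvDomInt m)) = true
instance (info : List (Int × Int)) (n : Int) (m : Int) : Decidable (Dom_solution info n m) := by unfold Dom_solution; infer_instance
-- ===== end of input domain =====

-- B replaces A's dict DP by exhaustive enumeration of all 2^len(info) item assignments (alternative algorithm, not faster).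

-- ===== PORT A =====
-- `if (A+x) not in next_state or next_state[A+x] > B: next_state[A+x] = B`
def pvCondInsert (d : PySem.Dict Int Int) (k c : Int) : PySem.Dict Int Int :=
  match d.get? k with
  | none => d.insert k c
  | some v => if v > c then d.insert k c else d

-- body of the inner `for A, B in prev_state.items()` loop
def pvStepA (n m x y : Int) (next : PySem.Dict Int Int) (p : Int × Int) : PySem.Dict Int Int :=
  let next1 := if p.1 + x < n then pvCondInsert next (p.1 + x) p.2 else next
  if p.2 + y < m then pvCondInsert next1 p.1 (p.2 + y) else next1

-- outer `for x, y in info` loop with the early `return -1`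
def pvLoopA (n m : Int) : List (Int × Int) → PySem.Dict Int Int → Int
  | [], prev =>
      -- min(prev_state.keys()); prev is never empty when reached (default 0 unreachable)
      match PySem.List.min? prev.keys (fun k => k) with
      | some v => v
      | none => 0
  | (x, y) :: rest, prev =>
      let next := prev.items.foldl (pvStepA n m x y) PySem.Dict.empty
      if next.items = [] then -1 else pvLoopA n m rest next

def solution (info : List (Int × Int)) (n : Int) (m : Int) : Int :=
  pvLoopA n m info (PySem.Dict.empty.insert 0 0)

-- ===== PORT B =====
-- inner `for x, y in info` simulation of one assignment; returns none on a broken constraint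
def pvSim (n m : Int) : List (Int × Int) → Int → Int → Int → Option Int
  | [], _, a, _ => some a
  | (x, y) :: rest, bits, a, b =>
      if PySem.Int.mod bits 2 = 1 then
        if b + y ≥ m then none else pvSim n m rest (PySem.Int.floordiv bits 2) a (b + y)
      else
        if a + x ≥ n then none else pvSim n m rest (PySem.Int.floordiv bits 2) (a + x) b

def pvBestStep (n m : Int) (info : List (Int × Int)) (best : Option Int) (mask : Int) : Option Int :=
  match pvSim n m info mask 0 0 with
  | none => best
  | some a =>
      match best with
      | none => some a
      | some v => if a < v then some a else best

def solution_alt (info : List (Int × Int)) (n : Int) (m : Int) : Int :=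
  match (PySem.List.pyRange 0 (2 ^ info.length) 1).foldl (pvBestStep n m info) none with
  | none => -1
  | some v => v

-- ===== PRECONDITION & SPEC =====
def Spec_solution (info : List (Int × Int)) (n : Int) (m : Int) (out : Int) : Prop := out = solution_alt info n m
instance (info : List (Int × Int)) (n : Int) (m : Int) (out : Int) : Decidable (Spec_solution info n m out) := by unfold Spec_solution; infer_instance

-- ===== CLAIM (what is proved, stated in full; the proofs are below) =====
def Claim_equal_solution : Prop := ∀ (info : List (Int × Int)) (n : Int) (m : Int), Dom_solution info n m → Spec_solution info n m (solution info n m)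

-- ===== LEMMAS AND PROOFS =====

-- ========== proof machinery ==========

-- minimum of two optional candidates (none = no candidate)
def omin : Option Int → Option Int → Option Int
  | none, o => o
  | some a, none => some a
  | some a, some b => some (min a b)

theorem omin_none_right (o : Option Int) : omin o none = o := by cases o <;> rfl

theorem omin_comm (o p : Option Int) : omin o p = omin p o := by
  cases o <;> cases p <;> simp [omin, min_comm]

theorem omin_assoc (o p q : Option Int) : omin (omin o p) q = omin o (omin p q) := by
  cases o <;> cases p <;> cases q <;> simp [omin, min_assoc]

theorem omin_left_comm (o p q : Option Int) : omin o (omin p q) = omin p (omin o q) := by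
  rw [← omin_assoc, omin_comm o p, omin_assoc]

-- the canonical branching value: minimal final A-trace from state (a, b), none if no valid completion
def dfs (n m : Int) : List (Int × Int) → Int → Int → Option Int
  | [], a, _ => some a
  | (x, y) :: rest, a, b =>
      omin (if a + x < n then dfs n m rest (a + x) b else none)
           (if b + y < m then dfs n m rest a (b + y) else none)

def F (os : List (Option Int)) : Option Int := os.foldr omin none

theorem F_nil : F [] = none := rfl

theorem F_cons (o : Option Int) (os : List (Option Int)) : F (o :: os) = omin o (F os) := rfl

theorem F_append (A B : List (Option Int)) : F (A ++ B) = omin (F A) (F B) := by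
  induction A with
  | nil => simp [F_nil, omin]
  | cons o A ih => simp [F_cons, ih, omin_assoc]

theorem F_map_none {α : Type} (L : List α) : F (L.map (fun _ => (none : Option Int))) = none := by
  induction L with
  | nil => rfl
  | cons p L ih => rw [List.map_cons, F_cons, ih]; rfl

theorem foldl_omin {α : Type} (g : α → Option Int) :
    ∀ (L : List α) (i : Option Int), L.foldl (fun acc x => omin acc (g x)) i = omin i (F (L.map g)) := by
  intro L
  induction L with
  | nil => intro i; simp [F_nil, omin_none_right]
  | cons p L ih => intro i; simp [List.foldl_cons, ih, F_cons, omin_assoc]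

-- value of a collection of states
def mval (n m : Int) (rest : List (Int × Int)) (L : List (Int × Int)) : Option Int :=
  F (L.map (fun p => dfs n m rest p.1 p.2))

theorem mval_nil (n m : Int) (rest : List (Int × Int)) : mval n m rest [] = none := rfl

theorem mval_cons (n m : Int) (rest : List (Int × Int)) (p : Int × Int) (L : List (Int × Int)) :
    mval n m rest (p :: L) = omin (dfs n m rest p.1 p.2) (mval n m rest L) := rfl

-- ===== dominance: a smaller B-trace is always at least as good =====

def ole (o o' : Option Int) : Prop := ∀ v', o' = some v' → ∃ v, o = some v ∧ v ≤ v'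

theorem ole_none (o : Option Int) : ole o none := by intro v' h; cases h

theorem ole_omin {o o' p p' : Option Int} (h1 : ole o o') (h2 : ole p p') :
    ole (omin o p) (omin o' p') := by
  intro v' hv'
  cases ho' : o' with
  | none =>
    cases hp' : p' with
    | none => rw [ho', hp'] at hv'; cases hv'
    | some w' =>
      rw [ho', hp'] at hv'
      have hv : w' = v' := by simpa [omin] using hv'
      obtain ⟨w, hw, hle⟩ := h2 w' hp'
      cases o with
      | none => exact ⟨w, by simpa [omin] using hw, by omega⟩
      | some u => exact ⟨min u w, by simp [omin, hw], by have := min_le_right u w; omega⟩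
  | some u' =>
    obtain ⟨u, hu, hule⟩ := h1 u' ho'
    cases hp' : p' with
    | none =>
      rw [ho', hp'] at hv'
      have hv : u' = v' := by simpa [omin] using hv'
      cases p with
      | none => exact ⟨u, by rw [omin_none_right]; exact hu, by omega⟩
      | some w => exact ⟨min u w, by simp [omin, hu], by have := min_le_left u w; omega⟩
    | some w' =>
      rw [ho', hp'] at hv'
      have hv : min u' w' = v' := by simpa [omin] using hv'
      obtain ⟨w, hw, hwle⟩ := h2 w' hp'
      refine ⟨min u w, by simp [omin, hu, hw], ?_⟩
      have := min_le_left u w; have := min_le_right u w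
      have := min_le_left u' w'; have := min_le_right u' w'
      omega

theorem dfs_mono (n m : Int) :
    ∀ (rest : List (Int × Int)) (a b b' : Int), b ≤ b' → ole (dfs n m rest a b) (dfs n m rest a b') := by
  intro rest
  induction rest with
  | nil =>
    intro a b b' _ v' hv'
    have : a = v' := by simpa [dfs] using hv'
    exact ⟨a, rfl, by omega⟩
  | cons q rest ih =>
    intro a b b' hbb'
    obtain ⟨x, y⟩ := q
    simp only [dfs]
    apply ole_omin
    · by_cases hc : a + x < n
      · simpa [hc] using ih (a + x) b b' hbb'
      · simpa [hc] using ole_none _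
    · by_cases hc' : b' + y < m
      · have hc : b + y < m := by omega
        simpa [hc, hc'] using ih a (b + y) (b' + y) (by omega)
      · simpa [hc'] using ole_none _

theorem omin_dfs_absorb (n m : Int) (rest : List (Int × Int)) (a b b' : Int) (h : b ≤ b') :
    omin (dfs n m rest a b) (dfs n m rest a b') = dfs n m rest a b := by
  cases h' : dfs n m rest a b' with
  | none => rw [omin_none_right]
  | some v' =>
    obtain ⟨v, hv, hle⟩ := dfs_mono n m rest a b b' h v' h'
    rw [hv]; simp [omin, min_eq_left hle]

-- rearrangement helpers (u absorbs/is absorbed by w)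
theorem omin_rearrange1 (p q u w : Option Int) (h : omin w u = w) :
    omin (omin p (omin u q)) w = omin p (omin w q) := by
  cases p <;> cases q <;> cases u <;> cases w <;> simp [omin] at h ⊢ <;> omega

theorem omin_rearrange2 (p q u w : Option Int) (h : omin u w = u) :
    omin (omin p (omin u q)) w = omin p (omin u q) := by
  cases p <;> cases q <;> cases u <;> cases w <;> simp [omin] at h ⊢ <;> omega

-- ===== the conditional insert of port A preserves the collection value =====

theorem nodup_keys_condInsert (d : PySem.Dict Int Int) (k c : Int) (h : d.keys.Nodup) :
    (pvCondInsert d k c).keys.Nodup := by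
  unfold pvCondInsert
  cases d.get? k with
  | none => exact PySem.Dict.nodup_keys_insert _ _ _ h
  | some v =>
    by_cases hv : v > c
    · simpa [hv] using PySem.Dict.nodup_keys_insert d k c h
    · simpa [hv] using h

theorem mval_append (n m : Int) (rest : List (Int × Int)) (A B : List (Int × Int)) :
    mval n m rest (A ++ B) = omin (mval n m rest A) (mval n m rest B) := by
  simp only [mval, List.map_append, F_append]

theorem mval_append_cons (n m : Int) (rest : List (Int × Int)) (A B : List (Int × Int)) (p : Int × Int) :
    mval n m rest (A ++ p :: B)
      = omin (mval n m rest A) (omin (dfs n m rest p.1 p.2) (mval n m rest B)) := by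
  rw [mval_append, mval_cons]

theorem mval_condInsert (n m : Int) (rest : List (Int × Int)) (d : PySem.Dict Int Int) (k c : Int)
    (hnd : d.keys.Nodup) :
    mval n m rest (pvCondInsert d k c).items = omin (mval n m rest d.items) (dfs n m rest k c) := by
  cases hg : d.get? k with
  | none =>
    have hc : d.contains k = false := (PySem.Dict.get?_eq_none_iff_contains d k).mp hg
    simp only [pvCondInsert, hg]
    rw [PySem.Dict.items_insert_of_not_contains d c hc, mval_append, mval_cons, mval_nil,
      omin_none_right]
  | some v =>
    have hmem : (k, v) ∈ d.items := PySem.Dict.mem_items_of_get?_eq_some d hg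
    obtain ⟨L1, L2, hsplit⟩ := List.append_of_mem hmem
    have hndk : ((L1 ++ (k, v) :: L2).map (fun p => p.1)).Nodup := by
      have := hnd
      simp only [PySem.Dict.keys, hsplit] at this
      exact this
    have hndk' := hndk
    rw [List.map_append, List.map_cons, List.nodup_append] at hndk'
    have hk1 : ∀ p ∈ L1, p.1 ≠ k := by
      intro p hp hpk
      have hm : k ∈ L1.map (fun p => p.1) := by
        rw [← hpk]; exact List.mem_map_of_mem hp
      exact hndk'.2.2 k hm k List.mem_cons_self rfl
    have hk2 : ∀ p ∈ L2, p.1 ≠ k := by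
      intro p hp hpk
      have hm : k ∈ L2.map (fun p => p.1) := by
        rw [← hpk]; exact List.mem_map_of_mem hp
      exact (List.nodup_cons.mp hndk'.2.1).1 hm
    have hcont : d.contains k = true := by
      rw [PySem.Dict.contains_eq_isSome_get?, hg]; rfl
    by_cases hv : v > c
    · simp only [pvCondInsert, hg, if_pos hv]
      rw [PySem.Dict.items_insert_of_contains d c hcont, hsplit, List.map_append, List.map_cons]
      have hL1 : L1.map (fun p => if (p.1 == k) = true then (k, c) else p) = L1 := by
        rw [List.map_congr_left (g := id) ?_, List.map_id]
        intro p hp; simp [hk1 p hp]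
      have hL2 : L2.map (fun p => if (p.1 == k) = true then (k, c) else p) = L2 := by
        rw [List.map_congr_left (g := id) ?_, List.map_id]
        intro p hp; simp [hk2 p hp]
      have hhead : (if ((((k, v) : Int × Int)).1 == k) = true then ((k, c) : Int × Int) else (k, v)) = (k, c) := by simp
      rw [hL1, hL2, hhead, mval_append_cons]
      conv_rhs => rw [mval_append_cons]
      exact (omin_rearrange1 _ _ _ _ (omin_dfs_absorb n m rest k c v (by omega))).symm
    · simp only [pvCondInsert, hg, if_neg hv]
      rw [hsplit, mval_append_cons]
      exact (omin_rearrange2 _ _ _ _ (omin_dfs_absorb n m rest k v c (by omega))).symm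

-- ===== one entry of the inner loop =====

theorem nodup_keys_stepA (n m x y : Int) (next : PySem.Dict Int Int) (p : Int × Int)
    (h : next.keys.Nodup) : (pvStepA n m x y next p).keys.Nodup := by
  unfold pvStepA
  by_cases h1 : p.1 + x < n <;> by_cases h2 : p.2 + y < m <;>
    simp [nodup_keys_condInsert, *]

theorem dfs_cons (n m x y : Int) (rest : List (Int × Int)) (a b : Int) :
    dfs n m ((x, y) :: rest) a b
      = omin (if a + x < n then dfs n m rest (a + x) b else none)
             (if b + y < m then dfs n m rest a (b + y) else none) := rfl

theorem mval_stepA (n m x y : Int) (rest : List (Int × Int)) (next : PySem.Dict Int Int)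
    (p : Int × Int) (hnd : next.keys.Nodup) :
    mval n m rest (pvStepA n m x y next p).items
      = omin (mval n m rest next.items) (dfs n m ((x, y) :: rest) p.1 p.2) := by
  rw [dfs_cons]
  by_cases h1 : p.1 + x < n <;> by_cases h2 : p.2 + y < m <;>
    simp only [pvStepA, h1, h2, if_true, if_false]
  · rw [mval_condInsert n m rest _ p.1 (p.2 + y) (nodup_keys_condInsert _ _ _ hnd),
      mval_condInsert n m rest next (p.1 + x) p.2 hnd, omin_assoc]
  · rw [mval_condInsert n m rest next (p.1 + x) p.2 hnd, omin_none_right]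
  · rw [mval_condInsert n m rest next p.1 (p.2 + y) hnd]; rfl
  · rw [show omin (none : Option Int) none = (none : Option Int) from rfl, omin_none_right]

theorem nodup_keys_foldA (n m x y : Int) :
    ∀ (P : List (Int × Int)) (next : PySem.Dict Int Int), next.keys.Nodup →
      (P.foldl (pvStepA n m x y) next).keys.Nodup := by
  intro P
  induction P with
  | nil => intro next h; exact h
  | cons p P ih => intro next h; exact ih _ (nodup_keys_stepA n m x y next p h)

theorem mval_foldA (n m x y : Int) (rest : List (Int × Int)) :
    ∀ (P : List (Int × Int)) (next : PySem.Dict Int Int), next.keys.Nodup →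
      mval n m rest (P.foldl (pvStepA n m x y) next).items
        = omin (mval n m rest next.items) (mval n m ((x, y) :: rest) P) := by
  intro P
  induction P with
  | nil => intro next h; simp [mval_nil, omin_none_right]
  | cons p P ih =>
    intro next h
    rw [List.foldl_cons, ih _ (nodup_keys_stepA n m x y next p h), mval_stepA n m x y rest next p h,
      mval_cons, omin_assoc]

-- ===== the final min over keys =====

theorem Fsome : ∀ (ks : List Int) (x : Int),
    omin (some x) (F (ks.map some)) = some (ks.foldl min x) := by
  intro ks
  induction ks with
  | nil => intro x; simp [F_nil, omin]
  | cons k ks ih => intro x; rw [List.map_cons, F_cons, ← omin_assoc]; simpa [omin] using ih (min x k)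

theorem mval_base (n m : Int) (p : Int × Int) (P : List (Int × Int)) :
    mval n m [] (p :: P) = some ((P.map Prod.fst).foldl min p.1) := by
  have : mval n m [] (p :: P) = omin (some p.1) (F ((P.map Prod.fst).map some)) := by
    simp [mval, dfs, F, List.map_map, Function.comp_def]
  rw [this, Fsome]

-- ===== port A computes dfs =====

theorem empty_items : (PySem.Dict.empty : PySem.Dict Int Int).items = [] := rfl

theorem empty_keys_nodup : (PySem.Dict.empty : PySem.Dict Int Int).keys.Nodup := by
  simp [PySem.Dict.keys, empty_items]

theorem loopA_eq (n m : Int) :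
    ∀ (items : List (Int × Int)) (prev : PySem.Dict Int Int), prev.keys.Nodup →
      prev.items ≠ [] →
      pvLoopA n m items prev = (match mval n m items prev.items with | none => -1 | some v => v) := by
  intro items
  induction items with
  | nil =>
    intro prev _ hne
    obtain ⟨p, P, hitems⟩ : ∃ p P, prev.items = p :: P := by
      cases h : prev.items with
      | nil => exact absurd h hne
      | cons p P => exact ⟨p, P, rfl⟩
    have hkeys : prev.keys = p.1 :: P.map Prod.fst := by
      simp only [PySem.Dict.keys, hitems, List.map_cons]
    simp only [pvLoopA, hkeys, PySem.List.min?_id_cons, hitems, mval_base]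
  | cons q items ih =>
    obtain ⟨x, y⟩ := q
    intro prev hnd hne
    simp only [pvLoopA]
    have hnext_nd : ((prev.items.foldl (pvStepA n m x y) PySem.Dict.empty)).keys.Nodup :=
      nodup_keys_foldA n m x y prev.items PySem.Dict.empty empty_keys_nodup
    have hfold := mval_foldA n m x y items prev.items PySem.Dict.empty empty_keys_nodup
    rw [empty_items, mval_nil] at hfold
    have hfold' : mval n m items ((prev.items.foldl (pvStepA n m x y) PySem.Dict.empty)).items
        = mval n m ((x, y) :: items) prev.items := by
      rw [hfold]; rfl
    by_cases hnil : ((prev.items.foldl (pvStepA n m x y) PySem.Dict.empty)).items = []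
    · rw [if_pos hnil]
      rw [hnil, mval_nil] at hfold'
      rw [← hfold']
    · rw [if_neg hnil, ih _ hnext_nd hnil, hfold']

theorem solution_eq_dfs (info : List (Int × Int)) (n m : Int) :
    solution info n m = (match dfs n m info 0 0 with | none => -1 | some v => v) := by
  unfold solution
  rw [loopA_eq n m info (PySem.Dict.empty.insert 0 0) (by decide) (by decide)]
  have h1 : (PySem.Dict.empty.insert (0:Int) (0:Int)).items = [(0, 0)] := by decide
  rw [h1, mval_cons, mval_nil, omin_none_right]

-- ===== port B computes dfs =====

theorem pvBestStep_eq_omin (n m : Int) (info : List (Int × Int)) (best : Option Int) (mask : Int) :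
    pvBestStep n m info best mask = omin best (pvSim n m info mask 0 0) := by
  unfold pvBestStep
  cases pvSim n m info mask 0 0 with
  | none => cases best <;> rfl
  | some a =>
    cases best with
    | none => rfl
    | some v => by_cases h : a < v <;> simp [omin, h] <;> omega

theorem F_range_two_mul (g : Nat → Option Int) :
    ∀ k : Nat, F ((List.range (2 * k)).map g)
      = omin (F ((List.range k).map (fun t => g (2 * t)))) (F ((List.range k).map (fun t => g (2 * t + 1)))) := by
  intro k
  induction k with
  | zero => simp [F_nil, omin]
  | succ k ih =>
    have h2 : 2 * (k + 1) = (2 * k + 1) + 1 := by ring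
    rw [h2]
    simp only [List.range_succ, List.map_append, F_append, List.map_cons, List.map_nil, F_cons,
      F_nil, omin_none_right]
    rw [ih]
    simp [omin_assoc, omin_comm, omin_left_comm]

theorem sim_even (n m x y : Int) (rest : List (Int × Int)) (a b u : Int) :
    pvSim n m ((x, y) :: rest) (2 * u) a b
      = if a + x ≥ n then none else pvSim n m rest u (a + x) b := by
  have hmod : PySem.Int.mod (2 * u) 2 = 0 := by
    simp only [PySem.Int.mod]; rw [Int.mul_fmod_right]
  have hdiv : PySem.Int.floordiv (2 * u) 2 = u := by
    simp only [PySem.Int.floordiv]; exact Int.mul_fdiv_cancel_left u (by norm_num)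
  simp only [pvSim, hmod, hdiv]
  norm_num

theorem sim_odd (n m x y : Int) (rest : List (Int × Int)) (a b u : Int) :
    pvSim n m ((x, y) :: rest) (2 * u + 1) a b
      = if b + y ≥ m then none else pvSim n m rest u a (b + y) := by
  have hmod : PySem.Int.mod (2 * u + 1) 2 = 1 := by
    simp only [PySem.Int.mod]; rw [add_comm, Int.add_mul_fmod_self_left]; decide
  have hdiv : PySem.Int.floordiv (2 * u + 1) 2 = u := by
    simp only [PySem.Int.floordiv]
    rw [add_comm, mul_comm, Int.add_mul_fdiv_right 1 u (by norm_num : (2:Int) ≠ 0)]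
    norm_num [Int.fdiv]
  simp only [pvSim, hmod, hdiv]
  norm_num

theorem F_range_sim (n m : Int) :
    ∀ (rest : List (Int × Int)) (a b : Int),
      F ((List.range (2 ^ rest.length)).map (fun t : Nat => pvSim n m rest (t : Int) a b))
        = dfs n m rest a b := by
  intro rest
  induction rest with
  | nil =>
    intro a b
    show F ((List.range 1).map _) = _
    simp [List.range_succ, F_cons, F_nil, omin_none_right, pvSim, dfs]
  | cons q rest ih =>
    obtain ⟨x, y⟩ := q
    intro a b
    have hpow : 2 ^ ((x, y) :: rest).length = 2 * 2 ^ rest.length := by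
      simp [List.length_cons, pow_succ]; ring
    rw [hpow, F_range_two_mul, dfs_cons]
    have heven : ∀ t : Nat, pvSim n m ((x, y) :: rest) ((2 * t : Nat) : Int) a b
        = if a + x ≥ n then none else pvSim n m rest (t : Int) (a + x) b := by
      intro t
      have : ((2 * t : Nat) : Int) = 2 * (t : Int) := by push_cast; ring
      rw [this, sim_even]
    have hodd : ∀ t : Nat, pvSim n m ((x, y) :: rest) ((2 * t + 1 : Nat) : Int) a b
        = if b + y ≥ m then none else pvSim n m rest (t : Int) a (b + y) := by
      intro t
      have : ((2 * t + 1 : Nat) : Int) = 2 * (t : Int) + 1 := by push_cast; ring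
      rw [this, sim_odd]
    have hE : F ((List.range (2 ^ rest.length)).map (fun t : Nat => pvSim n m ((x, y) :: rest) ((2 * t : Nat) : Int) a b))
        = (if a + x < n then dfs n m rest (a + x) b else none) := by
      by_cases hc : a + x < n
      · rw [if_pos hc]
        calc F ((List.range (2 ^ rest.length)).map (fun t : Nat => pvSim n m ((x, y) :: rest) ((2 * t : Nat) : Int) a b))
            = F ((List.range (2 ^ rest.length)).map (fun t : Nat => pvSim n m rest (t : Int) (a + x) b)) := by
              congr 1; apply List.map_congr_left; intro t _; rw [heven t, if_neg (by omega)]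
          _ = dfs n m rest (a + x) b := ih (a + x) b
      · rw [if_neg hc]
        calc F ((List.range (2 ^ rest.length)).map (fun t : Nat => pvSim n m ((x, y) :: rest) ((2 * t : Nat) : Int) a b))
            = F ((List.range (2 ^ rest.length)).map (fun _ => (none : Option Int))) := by
              congr 1; apply List.map_congr_left; intro t _; rw [heven t, if_pos (by omega)]
          _ = none := F_map_none _
    have hO : F ((List.range (2 ^ rest.length)).map (fun t : Nat => pvSim n m ((x, y) :: rest) ((2 * t + 1 : Nat) : Int) a b))
        = (if b + y < m then dfs n m rest a (b + y) else none) := by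
      by_cases hc : b + y < m
      · rw [if_pos hc]
        calc F ((List.range (2 ^ rest.length)).map (fun t : Nat => pvSim n m ((x, y) :: rest) ((2 * t + 1 : Nat) : Int) a b))
            = F ((List.range (2 ^ rest.length)).map (fun t : Nat => pvSim n m rest (t : Int) a (b + y))) := by
              congr 1; apply List.map_congr_left; intro t _; rw [hodd t, if_neg (by omega)]
          _ = dfs n m rest a (b + y) := ih a (b + y)
      · rw [if_neg hc]
        calc F ((List.range (2 ^ rest.length)).map (fun t : Nat => pvSim n m ((x, y) :: rest) ((2 * t + 1 : Nat) : Int) a b))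
            = F ((List.range (2 ^ rest.length)).map (fun _ => (none : Option Int))) := by
              congr 1; apply List.map_congr_left; intro t _; rw [hodd t, if_pos (by omega)]
          _ = none := F_map_none _
    rw [hE, hO]

theorem solution_alt_eq_dfs (info : List (Int × Int)) (n m : Int) :
    solution_alt info n m = (match dfs n m info 0 0 with | none => -1 | some v => v) := by
  unfold solution_alt
  have hrange : PySem.List.pyRange 0 (2 ^ info.length) 1
      = (List.range (2 ^ info.length)).map (fun k => ((k : Nat) : Int)) := by
    rw [PySem.List.pyRange_one]
    have h : ((2:Int) ^ info.length - 0).toNat = 2 ^ info.length := by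
      have h2 : ((2:Int) ^ info.length) = ((2 ^ info.length : Nat) : Int) := by push_cast; ring
      rw [h2, sub_zero, Int.toNat_natCast]
    rw [h]
    apply List.map_congr_left; intro k _; omega
  rw [hrange]
  simp only [pvBestStep_eq_omin, List.foldl_map]
  rw [foldl_omin (fun t : Nat => pvSim n m info (t : Int) 0 0) (List.range (2 ^ info.length)) none]
  rw [show (omin none (F ((List.range (2 ^ info.length)).map fun t : Nat => pvSim n m info (t : Int) 0 0))) = F ((List.range (2 ^ info.length)).map fun t : Nat => pvSim n m info (t : Int) 0 0) from rfl]
  rw [F_range_sim n m info 0 0]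

-- ===== VERDICT (by name: the statement is the Claim_ definition above) =====
theorem solution_spec : Claim_equal_solution := by
  intro info n m _
  unfold Spec_solution
  rw [solution_eq_dfs, solution_alt_eq_dfs]
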